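-- pv_equiv track=rewrite | github.com/Sowmya-1730/Leet-Code | 2572-append-characters-to-string-to-make-subsequence/append-characters-to-string-to-make-subsequence.py | appendCharacters
-- ===== SOURCE A (Python) =====
-- def appendCharacters(s: str, t: str) -> int:
--     c=0
--     i,j=0,0
--     while(i<len(s) and j<len(t)):
--         if s[i]==t[j]:
--             c+=1
--             i+=1
--             j+=1
--         else:
--             i+=1
--     res = len(t)-c
--     return res
-- ===== SOURCE B (Python) =====
-- def appendCharacters(s: str, t: str) -> int:
--     rest = s
--     for k, ch in enumerate(t):
--         idx = rest.find(ch)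
--         if idx == -1:
--             return len(t) - k
--         rest = rest[idx + 1:]
--     return 0
-- ===== Notes on version B (the rewrite author's own statement) =====
-- stated objective: idiomatic
-- what changed: B iterates over t with str.find to locate each character in the remaining suffix of s, instead of A's explicit two-pointer character-by-character scan of s.
import Mathlib
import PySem

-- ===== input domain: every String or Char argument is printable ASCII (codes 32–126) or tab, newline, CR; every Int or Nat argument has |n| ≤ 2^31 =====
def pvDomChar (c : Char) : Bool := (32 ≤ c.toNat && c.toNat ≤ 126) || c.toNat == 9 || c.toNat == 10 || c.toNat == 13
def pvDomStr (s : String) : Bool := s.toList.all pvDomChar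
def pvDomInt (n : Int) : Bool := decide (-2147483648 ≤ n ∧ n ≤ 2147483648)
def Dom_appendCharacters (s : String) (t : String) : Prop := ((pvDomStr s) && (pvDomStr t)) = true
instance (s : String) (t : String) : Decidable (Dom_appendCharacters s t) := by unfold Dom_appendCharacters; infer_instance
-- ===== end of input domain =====

-- B replaces A's two-pointer scan by an iteration over t that delegates the scan of s to str.find (idiomatic; same cost).

-- ===== PORT A =====
-- A's while loop over (i, j): structural recursion on the two character lists,
-- returning the final count c of matched characters.
def pvLoopA : List Char → List Char → Int
  | [], _ => 0
  | _ :: _, [] => 0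
  | a :: ss, b :: ts => if a == b then 1 + pvLoopA ss ts else pvLoopA ss (b :: ts)

def appendCharacters (s : String) (t : String) : Int :=
  (t.toList.length : Int) - pvLoopA s.toList t.toList

-- ===== PORT B =====
-- B's for-loop over enumerate(t) with the remaining suffix `rest` of s and index k.
-- rest.find(ch) for a single character ch is ported as List.findIdx? (· == ch)
-- (exact: Python returns the least index of ch in rest, or -1 = none here).
def pvLoopB (n : Int) : List Char → List Char → Int → Int
  | _, [], _ => 0
  | rest, ch :: ts, k =>
    match rest.findIdx? (· == ch) with
    | none => n - k
    | some idx => pvLoopB n (rest.drop (idx + 1)) ts (k + 1)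

def appendCharacters_alt (s : String) (t : String) : Int :=
  pvLoopB (t.toList.length : Int) s.toList t.toList 0

-- ===== PRECONDITION & SPEC =====
def Spec_appendCharacters (s : String) (t : String) (out : Int) : Prop := out = appendCharacters_alt s t
instance (s : String) (t : String) (out : Int) : Decidable (Spec_appendCharacters s t out) := by unfold Spec_appendCharacters; infer_instance

-- ===== CLAIM (what is proved, stated in full; the proofs are below) =====
def Claim_equal_appendCharacters : Prop := ∀ (s : String) (t : String), Dom_appendCharacters s t → Spec_appendCharacters s t (appendCharacters s t)

-- ===== LEMMAS AND PROOFS =====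

-- A's scan with first target ch, characterised by the first occurrence of ch.
theorem pvLoopA_find (ch : Char) (ts : List Char) :
    ∀ rest : List Char, pvLoopA rest (ch :: ts) =
      match rest.findIdx? (· == ch) with
      | none => 0
      | some idx => 1 + pvLoopA (rest.drop (idx + 1)) ts := by
  intro rest
  induction rest with
  | nil => simp [pvLoopA]
  | cons a rs ih =>
    by_cases h : a = ch
    · subst h
      simp [pvLoopA, List.findIdx?_cons]
    · have hne : (a == ch) = false := by simp [h]
      simp only [pvLoopA, hne, List.findIdx?_cons, ih]
      cases hfi : rs.findIdx? (· == ch) with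
      | none => simp
      | some idx => simp [List.drop_succ_cons]

theorem pvLoopB_eq (n : Int) :
    ∀ (ts rest : List Char) (k : Int), k + (ts.length : Int) = n →
      pvLoopB n rest ts k = n - k - pvLoopA rest ts := by
  intro ts
  induction ts with
  | nil =>
    intro rest k hk
    simp only [List.length_nil, Int.natCast_zero, add_zero] at hk
    cases rest <;> simp [pvLoopB, pvLoopA] <;> omega
  | cons ch ts ih =>
    intro rest k hk
    rw [pvLoopA_find]
    cases hfi : rest.findIdx? (· == ch) with
    | none => simp [pvLoopB, hfi]
    | some idx =>
      have hk' : (k + 1) + (ts.length : Int) = n := by simp only [List.length_cons] at hk; push_cast at hk ⊢; omega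
      simp only [pvLoopB, hfi, ih _ _ hk']
      ring

-- ===== VERDICT (by name: the statement is the Claim_ definition above) =====
theorem appendCharacters_spec : Claim_equal_appendCharacters := by
  intro s t _
  show _ = _
  rw [appendCharacters, appendCharacters_alt, pvLoopB_eq _ _ _ 0 (by simp)]
  ring
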